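-- pv_equiv track=rewrite | github.com/MyCuteGuineaPig/Leetcode | String/1410. HTML Entity Parser.py | entityParser
-- ===== SOURCE A (Python) =====
-- def entityParser(text: str) -> str:
--     def add(entity: str, symbol: str):
--         node = trie
--         for c in entity:
--             node = node.setdefault(c, {})
--         node['#'] = symbol
--
--     def check(idx: int) -> tuple:
--         node = trie
--         while text[idx] in node:
--             node = node[text[idx]]
--             idx += 1
--             if '#' in node: return node['#'], idx
--         return False, idx
--
--     def parse():
--         i = 0
--         while i < len(text):
--             if text[i] in trie:
--                 symbol, j = check(i)
--                 yield symbol or text[i:j]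
--                 i = j
--             else:
--                 yield text[i]
--                 i += 1
--
--     trie = {}
--     entities = [('&quot;', '"'), ('&apos;', "'"), ('&amp;', '&'), ('&gt;', '>'), ('&lt;', '<'), ('&frasl;', '/')]
--     for entity, symbol in entities:
--         add(entity, symbol)
--     return ''.join(parse())
-- ===== SOURCE B (Python) =====
-- def entityParser(text: str) -> str:
--     table = {'&quot;': '"', '&apos;': "'", '&amp;': '&', '&gt;': '>', '&lt;': '<', '&frasl;': '/'}
--     out = []
--     i = 0
--     n = len(text)
--     while i < n:
--         if text[i] == '&':
--             for ent, ch in table.items():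
--                 if text.startswith(ent, i):
--                     out.append(ch)
--                     i += len(ent)
--                     break
--             else:
--                 out.append('&')
--                 i += 1
--         else:
--             out.append(text[i])
--             i += 1
--     return ''.join(out)
-- ===== Notes on version B (the rewrite author's own statement) =====
-- stated objective: idiomatic
-- what changed: B drops A's hand-built nested-dict trie, check() walker and generator, and instead does one scan that at each '&' tries the six entity strings with str.startswith; A's IndexError on texts ending in a partial entity is excluded by Pre_ and documented as Raises_, where B returns the text with the partial entity left unreplaced.
-- outside the precondition, e.g. on entityParser('&'): A raises IndexError, B returns '&'
-- crash fix: A raises IndexError whenever the text ends in a nonempty proper prefix of one of the six entities (check() indexes past the end of text); B returns the text with that trailing partial entity left as is. — e.g. on entityParser("&amp"): A raises IndexError, B returns "&amp"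
import Mathlib
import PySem

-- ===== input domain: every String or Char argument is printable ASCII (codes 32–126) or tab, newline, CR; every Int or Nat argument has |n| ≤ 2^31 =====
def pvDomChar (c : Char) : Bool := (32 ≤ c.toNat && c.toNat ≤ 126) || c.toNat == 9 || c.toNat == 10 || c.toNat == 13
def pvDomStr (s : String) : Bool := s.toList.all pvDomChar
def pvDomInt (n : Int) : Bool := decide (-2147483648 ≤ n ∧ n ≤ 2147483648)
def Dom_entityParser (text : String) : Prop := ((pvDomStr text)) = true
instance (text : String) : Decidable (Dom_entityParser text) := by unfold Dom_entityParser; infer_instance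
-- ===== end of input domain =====

-- B replaces A's hand-built trie + generator scan with a table of the six
-- entities and a single scan trying startswith at each '&' (idiomatic rewrite,
-- same single non-overlapping left-to-right pass).


-- ===== PORT A =====
-- A builds a trie from the six entities, then scans the text with a
-- check(idx) walk and a generator yielding chunks; ported step for step.
-- Python dicts of dicts become the mutual inductive Trie/TrieKids
-- (child association list in insertion order, '#' slot = Option String).
mutual
inductive Trie where
  | mk : TrieKids → Option String → Trie
  deriving DecidableEq
inductive TrieKids where
  | nil : TrieKids
  | cons : Char → Trie → TrieKids → TrieKids
  deriving DecidableEq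
end

-- dict lookup 'node[c]' / 'c in node' on the child list
def kidsFind : TrieKids → Char → Option Trie
  | .nil, _ => none
  | .cons k t rest, c => if c = k then some t else kidsFind rest c

-- dict store 'node[c] = t' (overwrite in place, else append)
def kidsSet : TrieKids → Char → Trie → TrieKids
  | .nil, c, t => .cons c t .nil
  | .cons k t0 rest, c, t => if c = k then .cons k t rest else .cons k t0 (kidsSet rest c t)

def childOf : Trie → Char → Option Trie
  | .mk kids _, c => kidsFind kids c

-- def add(entity, symbol): node.setdefault chain, then node['#'] = symbol
def addT : Trie → List Char → String → Trie
  | .mk kids _, [], s => .mk kids (some s)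
  | .mk kids leaf, c :: cs, s =>
      .mk (kidsSet kids c (addT ((kidsFind kids c).getD (.mk .nil none)) cs s)) leaf

def entitiesA : List (List Char × String) :=
  [("&quot;".toList, "\""), ("&apos;".toList, "'"), ("&amp;".toList, "&"),
   ("&gt;".toList, ">"), ("&lt;".toList, "<"), ("&frasl;".toList, "/")]

-- 'for entity, symbol in entities: add(entity, symbol)'
def trieA : Trie := entitiesA.foldl (fun t p => addT t p.1 p.2) (.mk .nil none)

-- def check(idx): the while-loop walk; 'rest' is text[idx:] as a char list.
-- On rest = [] Python evaluates text[idx] and raises IndexError (Pre_ excludes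
-- reaching that); the port returns (none, idx) there.
def checkT (node : Trie) (rest : List Char) (idx : Nat) : Option String × Nat :=
  match rest with
  | [] => (none, idx)
  | c :: cs =>
    match childOf node c with
    | none => (none, idx)
    | some n' =>
      match n' with
      | .mk _ (some s) => (some s, idx + 1)
      | .mk k none => checkT (.mk k none) cs (idx + 1)

lemma checkT_le (node : Trie) (rest : List Char) (idx : Nat) :
    idx ≤ (checkT node rest idx).2 := by
  induction rest generalizing node idx with
  | nil => simp [checkT]
  | cons c cs ih =>
    simp only [checkT]
    rcases h : childOf node c with _ | ⟨⟨k, l⟩⟩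
    · simp
    · rcases l with _ | s
      · exact le_trans (Nat.le_succ idx) (ih _ (idx+1))
      · simp

lemma checkT_succ_le (node : Trie) (c : Char) (cs : List Char) (idx : Nat)
    (h : (childOf node c).isSome) : idx + 1 ≤ (checkT node (c :: cs) idx).2 := by
  simp only [checkT]
  rcases hc : childOf node c with _ | ⟨⟨k, l⟩⟩
  · rw [hc] at h; simp at h
  · rcases l with _ | s
    · exact checkT_le _ cs (idx+1)
    · simp

-- def parse(): the generator; yields are collected as a list of char chunks,
-- ''.join at the end.  i is the absolute index, rest = text[i:].
def parseT (t : Trie) (i : Nat) (rest : List Char) : List (List Char) :=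
  match rest with
  | [] => []
  | c :: cs =>
    if h : (childOf t c).isSome then
      match hc : checkT t (c :: cs) i with
      | (some s, j) => s.toList :: parseT t j (List.drop (j - i) (c :: cs))
      | (none, j) => (List.take (j - i) (c :: cs)) :: parseT t j (List.drop (j - i) (c :: cs))
    else
      [c] :: parseT t (i + 1) cs
termination_by rest.length
decreasing_by
  · have h1 := checkT_succ_le t c cs i h
    rw [hc] at h1
    simp; omega
  · have h1 := checkT_succ_le t c cs i h
    rw [hc] at h1
    simp; omega
  · simp

def entityParser (text : String) : String :=
  String.ofList (parseT trieA 0 text.toList).flatten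

-- ===== PORT B =====
-- B: table of the six entities; single scan, at '&' try text.startswith(ent, i)
-- for each table entry in order (startswith ported as List.isPrefixOf on the
-- suffix, exact for these all-ASCII strings).
def entTable : List (List Char × Char) :=
  [("&quot;".toList, '"'), ("&apos;".toList, '\''), ("&amp;".toList, '&'),
   ("&gt;".toList, '>'), ("&lt;".toList, '<'), ("&frasl;".toList, '/')]

-- the for/else over table.items(): first entity that is a prefix, with its length
def findEnt : List (List Char × Char) → List Char → Option (Char × Nat)
  | [], _ => none
  | (e, ch) :: t, rest => if e.isPrefixOf rest then some (ch, e.length) else findEnt t rest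

lemma findEnt_one_le (tbl : List (List Char × Char)) (rest : List Char) (ch : Char) (k : Nat)
    (hp : ∀ p ∈ tbl, 1 ≤ p.1.length) (h : findEnt tbl rest = some (ch, k)) : 1 ≤ k := by
  induction tbl with
  | nil => simp [findEnt] at h
  | cons p t ih =>
    rcases p with ⟨e, c2⟩
    simp only [findEnt] at h
    split at h
    · cases h; exact hp (e, ch) (by simp)
    · exact ih (fun q hq => hp q (by simp [hq])) h

-- the while loop: out is built as a list of char chunks, ''.join at the end
def altGo (rest : List Char) : List (List Char) :=
  match rest with
  | [] => []
  | c :: cs =>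
    if c = '&' then
      match hf : findEnt entTable (c :: cs) with
      | some (ch, k) => [ch] :: altGo (List.drop k (c :: cs))
      | none => ['&'] :: altGo cs
    else
      [c] :: altGo cs
termination_by rest.length
decreasing_by
  · have h1 := findEnt_one_le entTable (c :: cs) ch k (by decide) hf
    simp; omega
  · simp
  · simp

def entityParser_alt (text : String) : String :=
  String.ofList (altGo text.toList).flatten

-- ===== PRECONDITION & SPEC =====
-- Every nonempty proper prefix of one of the six entity strings.
def badPrefixes : List (List Char) :=
  [['&'],
   ['&', 'q'],
   ['&', 'q', 'u'],
   ['&', 'q', 'u', 'o'],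
   ['&', 'q', 'u', 'o', 't'],
   ['&', 'a'],
   ['&', 'a', 'p'],
   ['&', 'a', 'p', 'o'],
   ['&', 'a', 'p', 'o', 's'],
   ['&', 'a', 'm'],
   ['&', 'a', 'm', 'p'],
   ['&', 'g'],
   ['&', 'g', 't'],
   ['&', 'l'],
   ['&', 'l', 't'],
   ['&', 'f'],
   ['&', 'f', 'r'],
   ['&', 'f', 'r', 'a'],
   ['&', 'f', 'r', 'a', 's'],
   ['&', 'f', 'r', 'a', 's', 'l']]

-- Pre_ excludes exactly the inputs on which A raises IndexError: texts ending
-- in a nonempty proper prefix of an entity (check() runs off the end of text).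
def Pre_entityParser (text : String) : Prop := ∀ p ∈ badPrefixes, ¬ p <:+ text.toList
instance (text : String) : Decidable (Pre_entityParser text) := by unfold Pre_entityParser; infer_instance
def pvWitness_entityParser : String := "x &amp; y"

-- A raises IndexError on texts ending in a nonempty proper prefix of an entity; B leaves that tail unreplaced and returns the text.
def Raises_entityParser (text : String) : Prop := ∃ p ∈ badPrefixes, p <:+ text.toList
instance (text : String) : Decidable (Raises_entityParser text) := by unfold Raises_entityParser; infer_instance
def pvRaiseWitness_entityParser : String := "&amp"
def pvRaiseWitnessOut_entityParser : String := "&amp"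

def Spec_entityParser (text : String) (out : String) : Prop := out = entityParser_alt text
instance (text : String) (out : String) : Decidable (Spec_entityParser text out) := by unfold Spec_entityParser; infer_instance

-- ===== CLAIM (what is proved, stated in full; the proofs are below) =====
def Claim_equal_entityParser : Prop := ∀ (text : String), Dom_entityParser text → Pre_entityParser text → Spec_entityParser text (entityParser text)
def Claim_raises_entityParser : Prop := (∀ (text : String), Dom_entityParser text → Raises_entityParser text → ¬ Pre_entityParser text) ∧ (Dom_entityParser (pvRaiseWitness_entityParser) ∧ Raises_entityParser (pvRaiseWitness_entityParser) ∧ entityParser_alt (pvRaiseWitness_entityParser) = pvRaiseWitnessOut_entityParser)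

-- ===== LEMMAS AND PROOFS =====
lemma trieA_eq : trieA =
  Trie.mk (TrieKids.cons '&' (Trie.mk (TrieKids.cons 'q' (Trie.mk (TrieKids.cons 'u' (Trie.mk (TrieKids.cons 'o' (Trie.mk (TrieKids.cons 't' (Trie.mk (TrieKids.cons ';' (Trie.mk (TrieKids.nil) (some "\"")) (TrieKids.nil)) (none)) (TrieKids.nil)) (none)) (TrieKids.nil)) (none)) (TrieKids.nil)) (none)) (TrieKids.cons 'a' (Trie.mk (TrieKids.cons 'p' (Trie.mk (TrieKids.cons 'o' (Trie.mk (TrieKids.cons 's' (Trie.mk (TrieKids.cons ';' (Trie.mk (TrieKids.nil) (some "'")) (TrieKids.nil)) (none)) (TrieKids.nil)) (none)) (TrieKids.nil)) (none)) (TrieKids.cons 'm' (Trie.mk (TrieKids.cons 'p' (Trie.mk (TrieKids.cons ';' (Trie.mk (TrieKids.nil) (some "&")) (TrieKids.nil)) (none)) (TrieKids.nil)) (none)) (TrieKids.nil))) (none)) (TrieKids.cons 'g' (Trie.mk (TrieKids.cons 't' (Trie.mk (TrieKids.cons ';' (Trie.mk (TrieKids.nil) (some ">")) (TrieKids.nil))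 (none)) (TrieKids.nil)) (none)) (TrieKids.cons 'l' (Trie.mk (TrieKids.cons 't' (Trie.mk (TrieKids.cons ';' (Trie.mk (TrieKids.nil) (some "<")) (TrieKids.nil)) (none)) (TrieKids.nil)) (none)) (TrieKids.cons 'f' (Trie.mk (TrieKids.cons 'r' (Trie.mk (TrieKids.cons 'a' (Trie.mk (TrieKids.cons 's' (Trie.mk (TrieKids.cons 'l' (Trie.mk (TrieKids.cons ';' (Trie.mk (TrieKids.nil) (some "/")) (TrieKids.nil)) (none)) (TrieKids.nil)) (none)) (TrieKids.nil)) (none)) (TrieKids.nil)) (none)) (TrieKids.nil)) (none)) (TrieKids.nil)))))) (none)) (TrieKids.nil)) (none) := by rfl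

lemma hbad_mono {tl rest : List Char} (hs : tl <:+ rest)
    (hb : ∀ p ∈ badPrefixes, ¬ p <:+ rest) : ∀ p ∈ badPrefixes, ¬ p <:+ tl :=
  fun p hp hps => hb p hp (hps.trans hs)

lemma parseT_nil (t : Trie) (i : Nat) : parseT t i [] = [] := by
  simp [parseT]

lemma parseT_skip (t : Trie) (c : Char) (cs : List Char) (i : Nat)
    (h : childOf t c = none) : parseT t i (c :: cs) = [c] :: parseT t (i + 1) cs := by
  rw [parseT.eq_def]
  simp [h]

lemma parseT_sym (t : Trie) (c : Char) (cs : List Char) (i j : Nat) (s : String)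
    (h : (childOf t c).isSome)
    (hc : checkT t (c :: cs) i = (some s, j)) :
    parseT t i (c :: cs) = s.toList :: parseT t j (List.drop (j - i) (c :: cs)) := by
  rw [parseT.eq_def]
  dsimp only
  rw [dif_pos h]
  split <;> simp_all

lemma parseT_chunk (t : Trie) (c : Char) (cs : List Char) (i j : Nat)
    (h : (childOf t c).isSome)
    (hc : checkT t (c :: cs) i = (none, j)) :
    parseT t i (c :: cs) =
      (List.take (j - i) (c :: cs)) :: parseT t j (List.drop (j - i) (c :: cs)) := by
  rw [parseT.eq_def]
  dsimp only
  rw [dif_pos h]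
  split <;> simp_all

lemma altGo_nil : altGo [] = [] := by simp [altGo]

lemma altGo_other (c : Char) (cs : List Char) (h : ¬ c = '&') :
    altGo (c :: cs) = [c] :: altGo cs := by
  rw [altGo.eq_def]
  simp [h]

lemma altGo_some (cs : List Char) (ch : Char) (k : Nat)
    (hf : findEnt entTable ('&' :: cs) = some (ch, k)) :
    altGo ('&' :: cs) = [ch] :: altGo (List.drop k ('&' :: cs)) := by
  rw [altGo.eq_def]
  dsimp only
  rw [if_pos rfl]
  split <;> simp_all

lemma altGo_none (cs : List Char)
    (hf : findEnt entTable ('&' :: cs) = none) :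
    altGo ('&' :: cs) = ['&'] :: altGo cs := by
  rw [altGo.eq_def]
  dsimp only
  rw [if_pos rfl]
  split <;> simp_all

lemma main_go : ∀ (n : Nat) (rest : List Char) (i : Nat), rest.length ≤ n →
    (∀ p ∈ badPrefixes, ¬ p <:+ rest) →
    (parseT trieA i rest).flatten = (altGo rest).flatten := by
  intro n
  induction n with
  | zero =>
    intro rest i hlen _
    have h0 : rest = [] := List.eq_nil_of_length_eq_zero (Nat.le_zero.mp hlen)
    subst h0; rw [parseT_nil, altGo_nil]
  | succ n ih =>
    intro rest i hlen hbad
    match rest with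
    | [] => rw [parseT_nil, altGo_nil]
    | c :: t1 =>
      by_cases hc0 : c = '&'
      · subst hc0
        have hch : (childOf trieA '&').isSome := by rw [trieA_eq]; rfl
        rcases t1 with _ | ⟨d1, t2⟩
        · exact absurd (List.suffix_refl _) (hbad ['&'] (by decide))
        · -- next char cases at &
          by_cases h1q : d1 = 'q'
          · subst h1q
            rcases t2 with _ | ⟨d2, t3⟩
            · exact absurd (List.suffix_refl _) (hbad ['&', 'q'] (by decide))
            · -- next char cases at &q
              by_cases h2u : d2 = 'u'
              · subst h2u
                rcases t3 with _ | ⟨d3, t4⟩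
                · exact absurd (List.suffix_refl _) (hbad ['&', 'q', 'u'] (by decide))
                · -- next char cases at &qu
                  by_cases h3o : d3 = 'o'
                  · subst h3o
                    rcases t4 with _ | ⟨d4, t5⟩
                    · exact absurd (List.suffix_refl _) (hbad ['&', 'q', 'u', 'o'] (by decide))
                    · -- next char cases at &quo
                      by_cases h4t : d4 = 't'
                      · subst h4t
                        rcases t5 with _ | ⟨d5, t6⟩
                        · exact absurd (List.suffix_refl _) (hbad ['&', 'q', 'u', 'o', 't'] (by decide))
                        · -- next char cases at &quot
                          by_cases h5x : d5 = ';'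
                          · subst h5x
                            have hck : checkT trieA ('&' :: 'q' :: 'u' :: 'o' :: 't' :: ';' :: t6) i = (some "\"", i + 1 + 1 + 1 + 1 + 1 + 1) := by
                              rw [trieA_eq]; simp [checkT, childOf, kidsFind]
                            have hA := parseT_sym trieA '&' ('q' :: 'u' :: 'o' :: 't' :: ';' :: t6) i (i + 1 + 1 + 1 + 1 + 1 + 1) "\"" hch hck
                            rw [show i + 1 + 1 + 1 + 1 + 1 + 1 - i = 6 from by omega] at hA
                            rw [show List.drop 6 ('&' :: 'q' :: 'u' :: 'o' :: 't' :: ';' :: t6) = t6 from rfl] at hA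
                            have hf : findEnt entTable ('&' :: 'q' :: 'u' :: 'o' :: 't' :: ';' :: t6) = some ('"', 6) := by
                              simp [findEnt, entTable, List.isPrefixOf]
                            have hB := altGo_some ('q' :: 'u' :: 'o' :: 't' :: ';' :: t6) '"' 6 hf
                            rw [show List.drop 6 ('&' :: 'q' :: 'u' :: 'o' :: 't' :: ';' :: t6) = t6 from rfl] at hB
                            have hih := ih t6 (i + 1 + 1 + 1 + 1 + 1 + 1) (by simp at hlen ⊢; omega) (hbad_mono ⟨['&', 'q', 'u', 'o', 't', ';'], rfl⟩ hbad)
                            rw [hA, hB]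
                            simp [hih]
                          · -- d5 ≠ ';'
                            have hck : checkT trieA ('&' :: 'q' :: 'u' :: 'o' :: 't' :: d5 :: t6) i = (none, i + 1 + 1 + 1 + 1 + 1) := by
                              rw [trieA_eq]; simp [checkT, childOf, kidsFind, h5x]
                            have hA := parseT_chunk trieA '&' ('q' :: 'u' :: 'o' :: 't' :: d5 :: t6) i (i + 1 + 1 + 1 + 1 + 1) hch hck
                            rw [show i + 1 + 1 + 1 + 1 + 1 - i = 5 from by omega] at hA
                            rw [show List.take 5 ('&' :: 'q' :: 'u' :: 'o' :: 't' :: d5 :: t6) = ['&', 'q', 'u', 'o', 't'] from rfl] at hA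
                            rw [show List.drop 5 ('&' :: 'q' :: 'u' :: 'o' :: 't' :: d5 :: t6) = d5 :: t6 from rfl] at hA
                            have hf : findEnt entTable ('&' :: 'q' :: 'u' :: 'o' :: 't' :: d5 :: t6) = none := by
                              simp [findEnt, entTable, List.isPrefixOf, h5x, (Ne.symm h5x)]
                            have hB := altGo_none ('q' :: 'u' :: 'o' :: 't' :: d5 :: t6) hf
                            rw [altGo_other 'q' ('u' :: 'o' :: 't' :: d5 :: t6) (by decide)] at hB
                            rw [altGo_other 'u' ('o' :: 't' :: d5 :: t6) (by decide)] at hB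
                            rw [altGo_other 'o' ('t' :: d5 :: t6) (by decide)] at hB
                            rw [altGo_other 't' (d5 :: t6) (by decide)] at hB
                            have hih := ih (d5 :: t6) (i + 1 + 1 + 1 + 1 + 1) (by simp at hlen ⊢; omega) (hbad_mono ⟨['&', 'q', 'u', 'o', 't'], rfl⟩ hbad)
                            rw [hA, hB]
                            simp [hih]
                      · -- d4 ≠ 't'
                        have hck : checkT trieA ('&' :: 'q' :: 'u' :: 'o' :: d4 :: t5) i = (none, i + 1 + 1 + 1 + 1) := by
                          rw [trieA_eq]; simp [checkT, childOf, kidsFind, h4t]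
                        have hA := parseT_chunk trieA '&' ('q' :: 'u' :: 'o' :: d4 :: t5) i (i + 1 + 1 + 1 + 1) hch hck
                        rw [show i + 1 + 1 + 1 + 1 - i = 4 from by omega] at hA
                        rw [show List.take 4 ('&' :: 'q' :: 'u' :: 'o' :: d4 :: t5) = ['&', 'q', 'u', 'o'] from rfl] at hA
                        rw [show List.drop 4 ('&' :: 'q' :: 'u' :: 'o' :: d4 :: t5) = d4 :: t5 from rfl] at hA
                        have hf : findEnt entTable ('&' :: 'q' :: 'u' :: 'o' :: d4 :: t5) = none := by
                          simp [findEnt, entTable, List.isPrefixOf, h4t, (Ne.symm h4t)]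
                        have hB := altGo_none ('q' :: 'u' :: 'o' :: d4 :: t5) hf
                        rw [altGo_other 'q' ('u' :: 'o' :: d4 :: t5) (by decide)] at hB
                        rw [altGo_other 'u' ('o' :: d4 :: t5) (by decide)] at hB
                        rw [altGo_other 'o' (d4 :: t5) (by decide)] at hB
                        have hih := ih (d4 :: t5) (i + 1 + 1 + 1 + 1) (by simp at hlen ⊢; omega) (hbad_mono ⟨['&', 'q', 'u', 'o'], rfl⟩ hbad)
                        rw [hA, hB]
                        simp [hih]
                  · -- d3 ≠ 'o'
                    have hck : checkT trieA ('&' :: 'q' :: 'u' :: d3 :: t4) i = (none, i + 1 + 1 + 1) := by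
                      rw [trieA_eq]; simp [checkT, childOf, kidsFind, h3o]
                    have hA := parseT_chunk trieA '&' ('q' :: 'u' :: d3 :: t4) i (i + 1 + 1 + 1) hch hck
                    rw [show i + 1 + 1 + 1 - i = 3 from by omega] at hA
                    rw [show List.take 3 ('&' :: 'q' :: 'u' :: d3 :: t4) = ['&', 'q', 'u'] from rfl] at hA
                    rw [show List.drop 3 ('&' :: 'q' :: 'u' :: d3 :: t4) = d3 :: t4 from rfl] at hA
                    have hf : findEnt entTable ('&' :: 'q' :: 'u' :: d3 :: t4) = none := by
                      simp [findEnt, entTable, List.isPrefixOf, h3o, (Ne.symm h3o)]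
                    have hB := altGo_none ('q' :: 'u' :: d3 :: t4) hf
                    rw [altGo_other 'q' ('u' :: d3 :: t4) (by decide)] at hB
                    rw [altGo_other 'u' (d3 :: t4) (by decide)] at hB
                    have hih := ih (d3 :: t4) (i + 1 + 1 + 1) (by simp at hlen ⊢; omega) (hbad_mono ⟨['&', 'q', 'u'], rfl⟩ hbad)
                    rw [hA, hB]
                    simp [hih]
              · -- d2 ≠ 'u'
                have hck : checkT trieA ('&' :: 'q' :: d2 :: t3) i = (none, i + 1 + 1) := by
                  rw [trieA_eq]; simp [checkT, childOf, kidsFind, h2u]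
                have hA := parseT_chunk trieA '&' ('q' :: d2 :: t3) i (i + 1 + 1) hch hck
                rw [show i + 1 + 1 - i = 2 from by omega] at hA
                rw [show List.take 2 ('&' :: 'q' :: d2 :: t3) = ['&', 'q'] from rfl] at hA
                rw [show List.drop 2 ('&' :: 'q' :: d2 :: t3) = d2 :: t3 from rfl] at hA
                have hf : findEnt entTable ('&' :: 'q' :: d2 :: t3) = none := by
                  simp [findEnt, entTable, List.isPrefixOf, h2u, (Ne.symm h2u)]
                have hB := altGo_none ('q' :: d2 :: t3) hf
                rw [altGo_other 'q' (d2 :: t3) (by decide)] at hB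
                have hih := ih (d2 :: t3) (i + 1 + 1) (by simp at hlen ⊢; omega) (hbad_mono ⟨['&', 'q'], rfl⟩ hbad)
                rw [hA, hB]
                simp [hih]
          · -- d1 ≠ 'q'
            by_cases h1a : d1 = 'a'
            · subst h1a
              rcases t2 with _ | ⟨d2, t3⟩
              · exact absurd (List.suffix_refl _) (hbad ['&', 'a'] (by decide))
              · -- next char cases at &a
                by_cases h2p : d2 = 'p'
                · subst h2p
                  rcases t3 with _ | ⟨d3, t4⟩
                  · exact absurd (List.suffix_refl _) (hbad ['&', 'a', 'p'] (by decide))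
                  · -- next char cases at &ap
                    by_cases h3o : d3 = 'o'
                    · subst h3o
                      rcases t4 with _ | ⟨d4, t5⟩
                      · exact absurd (List.suffix_refl _) (hbad ['&', 'a', 'p', 'o'] (by decide))
                      · -- next char cases at &apo
                        by_cases h4s : d4 = 's'
                        · subst h4s
                          rcases t5 with _ | ⟨d5, t6⟩
                          · exact absurd (List.suffix_refl _) (hbad ['&', 'a', 'p', 'o', 's'] (by decide))
                          · -- next char cases at &apos
                            by_cases h5x : d5 = ';'
                            · subst h5x
                              have hck : checkT trieA ('&' :: 'a' :: 'p' :: 'o' :: 's' :: ';' :: t6) i = (some "'", i + 1 + 1 + 1 + 1 + 1 + 1) := by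
                                rw [trieA_eq]; simp [checkT, childOf, kidsFind]
                              have hA := parseT_sym trieA '&' ('a' :: 'p' :: 'o' :: 's' :: ';' :: t6) i (i + 1 + 1 + 1 + 1 + 1 + 1) "'" hch hck
                              rw [show i + 1 + 1 + 1 + 1 + 1 + 1 - i = 6 from by omega] at hA
                              rw [show List.drop 6 ('&' :: 'a' :: 'p' :: 'o' :: 's' :: ';' :: t6) = t6 from rfl] at hA
                              have hf : findEnt entTable ('&' :: 'a' :: 'p' :: 'o' :: 's' :: ';' :: t6) = some ('\'', 6) := by
                                simp [findEnt, entTable, List.isPrefixOf]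
                              have hB := altGo_some ('a' :: 'p' :: 'o' :: 's' :: ';' :: t6) '\'' 6 hf
                              rw [show List.drop 6 ('&' :: 'a' :: 'p' :: 'o' :: 's' :: ';' :: t6) = t6 from rfl] at hB
                              have hih := ih t6 (i + 1 + 1 + 1 + 1 + 1 + 1) (by simp at hlen ⊢; omega) (hbad_mono ⟨['&', 'a', 'p', 'o', 's', ';'], rfl⟩ hbad)
                              rw [hA, hB]
                              simp [hih]
                            · -- d5 ≠ ';'
                              have hck : checkT trieA ('&' :: 'a' :: 'p' :: 'o' :: 's' :: d5 :: t6) i = (none, i + 1 + 1 + 1 + 1 + 1) := by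
                                rw [trieA_eq]; simp [checkT, childOf, kidsFind, h5x]
                              have hA := parseT_chunk trieA '&' ('a' :: 'p' :: 'o' :: 's' :: d5 :: t6) i (i + 1 + 1 + 1 + 1 + 1) hch hck
                              rw [show i + 1 + 1 + 1 + 1 + 1 - i = 5 from by omega] at hA
                              rw [show List.take 5 ('&' :: 'a' :: 'p' :: 'o' :: 's' :: d5 :: t6) = ['&', 'a', 'p', 'o', 's'] from rfl] at hA
                              rw [show List.drop 5 ('&' :: 'a' :: 'p' :: 'o' :: 's' :: d5 :: t6) = d5 :: t6 from rfl] at hA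
                              have hf : findEnt entTable ('&' :: 'a' :: 'p' :: 'o' :: 's' :: d5 :: t6) = none := by
                                simp [findEnt, entTable, List.isPrefixOf, h5x, (Ne.symm h5x)]
                              have hB := altGo_none ('a' :: 'p' :: 'o' :: 's' :: d5 :: t6) hf
                              rw [altGo_other 'a' ('p' :: 'o' :: 's' :: d5 :: t6) (by decide)] at hB
                              rw [altGo_other 'p' ('o' :: 's' :: d5 :: t6) (by decide)] at hB
                              rw [altGo_other 'o' ('s' :: d5 :: t6) (by decide)] at hB
                              rw [altGo_other 's' (d5 :: t6) (by decide)] at hB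
                              have hih := ih (d5 :: t6) (i + 1 + 1 + 1 + 1 + 1) (by simp at hlen ⊢; omega) (hbad_mono ⟨['&', 'a', 'p', 'o', 's'], rfl⟩ hbad)
                              rw [hA, hB]
                              simp [hih]
                        · -- d4 ≠ 's'
                          have hck : checkT trieA ('&' :: 'a' :: 'p' :: 'o' :: d4 :: t5) i = (none, i + 1 + 1 + 1 + 1) := by
                            rw [trieA_eq]; simp [checkT, childOf, kidsFind, h4s]
                          have hA := parseT_chunk trieA '&' ('a' :: 'p' :: 'o' :: d4 :: t5) i (i + 1 + 1 + 1 + 1) hch hck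
                          rw [show i + 1 + 1 + 1 + 1 - i = 4 from by omega] at hA
                          rw [show List.take 4 ('&' :: 'a' :: 'p' :: 'o' :: d4 :: t5) = ['&', 'a', 'p', 'o'] from rfl] at hA
                          rw [show List.drop 4 ('&' :: 'a' :: 'p' :: 'o' :: d4 :: t5) = d4 :: t5 from rfl] at hA
                          have hf : findEnt entTable ('&' :: 'a' :: 'p' :: 'o' :: d4 :: t5) = none := by
                            simp [findEnt, entTable, List.isPrefixOf, h4s, (Ne.symm h4s)]
                          have hB := altGo_none ('a' :: 'p' :: 'o' :: d4 :: t5) hf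
                          rw [altGo_other 'a' ('p' :: 'o' :: d4 :: t5) (by decide)] at hB
                          rw [altGo_other 'p' ('o' :: d4 :: t5) (by decide)] at hB
                          rw [altGo_other 'o' (d4 :: t5) (by decide)] at hB
                          have hih := ih (d4 :: t5) (i + 1 + 1 + 1 + 1) (by simp at hlen ⊢; omega) (hbad_mono ⟨['&', 'a', 'p', 'o'], rfl⟩ hbad)
                          rw [hA, hB]
                          simp [hih]
                    · -- d3 ≠ 'o'
                      have hck : checkT trieA ('&' :: 'a' :: 'p' :: d3 :: t4) i = (none, i + 1 + 1 + 1) := by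
                        rw [trieA_eq]; simp [checkT, childOf, kidsFind, h3o]
                      have hA := parseT_chunk trieA '&' ('a' :: 'p' :: d3 :: t4) i (i + 1 + 1 + 1) hch hck
                      rw [show i + 1 + 1 + 1 - i = 3 from by omega] at hA
                      rw [show List.take 3 ('&' :: 'a' :: 'p' :: d3 :: t4) = ['&', 'a', 'p'] from rfl] at hA
                      rw [show List.drop 3 ('&' :: 'a' :: 'p' :: d3 :: t4) = d3 :: t4 from rfl] at hA
                      have hf : findEnt entTable ('&' :: 'a' :: 'p' :: d3 :: t4) = none := by
                        simp [findEnt, entTable, List.isPrefixOf, h3o, (Ne.symm h3o)]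
                      have hB := altGo_none ('a' :: 'p' :: d3 :: t4) hf
                      rw [altGo_other 'a' ('p' :: d3 :: t4) (by decide)] at hB
                      rw [altGo_other 'p' (d3 :: t4) (by decide)] at hB
                      have hih := ih (d3 :: t4) (i + 1 + 1 + 1) (by simp at hlen ⊢; omega) (hbad_mono ⟨['&', 'a', 'p'], rfl⟩ hbad)
                      rw [hA, hB]
                      simp [hih]
                · -- d2 ≠ 'p'
                  by_cases h2m : d2 = 'm'
                  · subst h2m
                    rcases t3 with _ | ⟨d3, t4⟩
                    · exact absurd (List.suffix_refl _) (hbad ['&', 'a', 'm'] (by decide))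
                    · -- next char cases at &am
                      by_cases h3p : d3 = 'p'
                      · subst h3p
                        rcases t4 with _ | ⟨d4, t5⟩
                        · exact absurd (List.suffix_refl _) (hbad ['&', 'a', 'm', 'p'] (by decide))
                        · -- next char cases at &amp
                          by_cases h4x : d4 = ';'
                          · subst h4x
                            have hck : checkT trieA ('&' :: 'a' :: 'm' :: 'p' :: ';' :: t5) i = (some "&", i + 1 + 1 + 1 + 1 + 1) := by
                              rw [trieA_eq]; simp [checkT, childOf, kidsFind]
                            have hA := parseT_sym trieA '&' ('a' :: 'm' :: 'p' :: ';' :: t5) i (i + 1 + 1 + 1 + 1 + 1) "&" hch hck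
                            rw [show i + 1 + 1 + 1 + 1 + 1 - i = 5 from by omega] at hA
                            rw [show List.drop 5 ('&' :: 'a' :: 'm' :: 'p' :: ';' :: t5) = t5 from rfl] at hA
                            have hf : findEnt entTable ('&' :: 'a' :: 'm' :: 'p' :: ';' :: t5) = some ('&', 5) := by
                              simp [findEnt, entTable, List.isPrefixOf]
                            have hB := altGo_some ('a' :: 'm' :: 'p' :: ';' :: t5) '&' 5 hf
                            rw [show List.drop 5 ('&' :: 'a' :: 'm' :: 'p' :: ';' :: t5) = t5 from rfl] at hB
                            have hih := ih t5 (i + 1 + 1 + 1 + 1 + 1) (by simp at hlen ⊢; omega) (hbad_mono ⟨['&', 'a', 'm', 'p', ';'], rfl⟩ hbad)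
                            rw [hA, hB]
                            simp [hih]
                          · -- d4 ≠ ';'
                            have hck : checkT trieA ('&' :: 'a' :: 'm' :: 'p' :: d4 :: t5) i = (none, i + 1 + 1 + 1 + 1) := by
                              rw [trieA_eq]; simp [checkT, childOf, kidsFind, h4x]
                            have hA := parseT_chunk trieA '&' ('a' :: 'm' :: 'p' :: d4 :: t5) i (i + 1 + 1 + 1 + 1) hch hck
                            rw [show i + 1 + 1 + 1 + 1 - i = 4 from by omega] at hA
                            rw [show List.take 4 ('&' :: 'a' :: 'm' :: 'p' :: d4 :: t5) = ['&', 'a', 'm', 'p'] from rfl] at hA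
                            rw [show List.drop 4 ('&' :: 'a' :: 'm' :: 'p' :: d4 :: t5) = d4 :: t5 from rfl] at hA
                            have hf : findEnt entTable ('&' :: 'a' :: 'm' :: 'p' :: d4 :: t5) = none := by
                              simp [findEnt, entTable, List.isPrefixOf, h4x, (Ne.symm h4x)]
                            have hB := altGo_none ('a' :: 'm' :: 'p' :: d4 :: t5) hf
                            rw [altGo_other 'a' ('m' :: 'p' :: d4 :: t5) (by decide)] at hB
                            rw [altGo_other 'm' ('p' :: d4 :: t5) (by decide)] at hB
                            rw [altGo_other 'p' (d4 :: t5) (by decide)] at hB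
                            have hih := ih (d4 :: t5) (i + 1 + 1 + 1 + 1) (by simp at hlen ⊢; omega) (hbad_mono ⟨['&', 'a', 'm', 'p'], rfl⟩ hbad)
                            rw [hA, hB]
                            simp [hih]
                      · -- d3 ≠ 'p'
                        have hck : checkT trieA ('&' :: 'a' :: 'm' :: d3 :: t4) i = (none, i + 1 + 1 + 1) := by
                          rw [trieA_eq]; simp [checkT, childOf, kidsFind, h3p]
                        have hA := parseT_chunk trieA '&' ('a' :: 'm' :: d3 :: t4) i (i + 1 + 1 + 1) hch hck
                        rw [show i + 1 + 1 + 1 - i = 3 from by omega] at hA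
                        rw [show List.take 3 ('&' :: 'a' :: 'm' :: d3 :: t4) = ['&', 'a', 'm'] from rfl] at hA
                        rw [show List.drop 3 ('&' :: 'a' :: 'm' :: d3 :: t4) = d3 :: t4 from rfl] at hA
                        have hf : findEnt entTable ('&' :: 'a' :: 'm' :: d3 :: t4) = none := by
                          simp [findEnt, entTable, List.isPrefixOf, h3p, (Ne.symm h3p)]
                        have hB := altGo_none ('a' :: 'm' :: d3 :: t4) hf
                        rw [altGo_other 'a' ('m' :: d3 :: t4) (by decide)] at hB
                        rw [altGo_other 'm' (d3 :: t4) (by decide)] at hB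
                        have hih := ih (d3 :: t4) (i + 1 + 1 + 1) (by simp at hlen ⊢; omega) (hbad_mono ⟨['&', 'a', 'm'], rfl⟩ hbad)
                        rw [hA, hB]
                        simp [hih]
                  · -- d2 ≠ 'm'
                    have hck : checkT trieA ('&' :: 'a' :: d2 :: t3) i = (none, i + 1 + 1) := by
                      rw [trieA_eq]; simp [checkT, childOf, kidsFind, h2p, h2m]
                    have hA := parseT_chunk trieA '&' ('a' :: d2 :: t3) i (i + 1 + 1) hch hck
                    rw [show i + 1 + 1 - i = 2 from by omega] at hA
                    rw [show List.take 2 ('&' :: 'a' :: d2 :: t3) = ['&', 'a'] from rfl] at hA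
                    rw [show List.drop 2 ('&' :: 'a' :: d2 :: t3) = d2 :: t3 from rfl] at hA
                    have hf : findEnt entTable ('&' :: 'a' :: d2 :: t3) = none := by
                      simp [findEnt, entTable, List.isPrefixOf, h2p, h2m, (Ne.symm h2p), (Ne.symm h2m)]
                    have hB := altGo_none ('a' :: d2 :: t3) hf
                    rw [altGo_other 'a' (d2 :: t3) (by decide)] at hB
                    have hih := ih (d2 :: t3) (i + 1 + 1) (by simp at hlen ⊢; omega) (hbad_mono ⟨['&', 'a'], rfl⟩ hbad)
                    rw [hA, hB]
                    simp [hih]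
            · -- d1 ≠ 'a'
              by_cases h1g : d1 = 'g'
              · subst h1g
                rcases t2 with _ | ⟨d2, t3⟩
                · exact absurd (List.suffix_refl _) (hbad ['&', 'g'] (by decide))
                · -- next char cases at &g
                  by_cases h2t : d2 = 't'
                  · subst h2t
                    rcases t3 with _ | ⟨d3, t4⟩
                    · exact absurd (List.suffix_refl _) (hbad ['&', 'g', 't'] (by decide))
                    · -- next char cases at &gt
                      by_cases h3x : d3 = ';'
                      · subst h3x
                        have hck : checkT trieA ('&' :: 'g' :: 't' :: ';' :: t4) i = (some ">", i + 1 + 1 + 1 + 1) := by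
                          rw [trieA_eq]; simp [checkT, childOf, kidsFind]
                        have hA := parseT_sym trieA '&' ('g' :: 't' :: ';' :: t4) i (i + 1 + 1 + 1 + 1) ">" hch hck
                        rw [show i + 1 + 1 + 1 + 1 - i = 4 from by omega] at hA
                        rw [show List.drop 4 ('&' :: 'g' :: 't' :: ';' :: t4) = t4 from rfl] at hA
                        have hf : findEnt entTable ('&' :: 'g' :: 't' :: ';' :: t4) = some ('>', 4) := by
                          simp [findEnt, entTable, List.isPrefixOf]
                        have hB := altGo_some ('g' :: 't' :: ';' :: t4) '>' 4 hf
                        rw [show List.drop 4 ('&' :: 'g' :: 't' :: ';' :: t4) = t4 from rfl] at hB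
                        have hih := ih t4 (i + 1 + 1 + 1 + 1) (by simp at hlen ⊢; omega) (hbad_mono ⟨['&', 'g', 't', ';'], rfl⟩ hbad)
                        rw [hA, hB]
                        simp [hih]
                      · -- d3 ≠ ';'
                        have hck : checkT trieA ('&' :: 'g' :: 't' :: d3 :: t4) i = (none, i + 1 + 1 + 1) := by
                          rw [trieA_eq]; simp [checkT, childOf, kidsFind, h3x]
                        have hA := parseT_chunk trieA '&' ('g' :: 't' :: d3 :: t4) i (i + 1 + 1 + 1) hch hck
                        rw [show i + 1 + 1 + 1 - i = 3 from by omega] at hA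
                        rw [show List.take 3 ('&' :: 'g' :: 't' :: d3 :: t4) = ['&', 'g', 't'] from rfl] at hA
                        rw [show List.drop 3 ('&' :: 'g' :: 't' :: d3 :: t4) = d3 :: t4 from rfl] at hA
                        have hf : findEnt entTable ('&' :: 'g' :: 't' :: d3 :: t4) = none := by
                          simp [findEnt, entTable, List.isPrefixOf, h3x, (Ne.symm h3x)]
                        have hB := altGo_none ('g' :: 't' :: d3 :: t4) hf
                        rw [altGo_other 'g' ('t' :: d3 :: t4) (by decide)] at hB
                        rw [altGo_other 't' (d3 :: t4) (by decide)] at hB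
                        have hih := ih (d3 :: t4) (i + 1 + 1 + 1) (by simp at hlen ⊢; omega) (hbad_mono ⟨['&', 'g', 't'], rfl⟩ hbad)
                        rw [hA, hB]
                        simp [hih]
                  · -- d2 ≠ 't'
                    have hck : checkT trieA ('&' :: 'g' :: d2 :: t3) i = (none, i + 1 + 1) := by
                      rw [trieA_eq]; simp [checkT, childOf, kidsFind, h2t]
                    have hA := parseT_chunk trieA '&' ('g' :: d2 :: t3) i (i + 1 + 1) hch hck
                    rw [show i + 1 + 1 - i = 2 from by omega] at hA
                    rw [show List.take 2 ('&' :: 'g' :: d2 :: t3) = ['&', 'g'] from rfl] at hA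
                    rw [show List.drop 2 ('&' :: 'g' :: d2 :: t3) = d2 :: t3 from rfl] at hA
                    have hf : findEnt entTable ('&' :: 'g' :: d2 :: t3) = none := by
                      simp [findEnt, entTable, List.isPrefixOf, h2t, (Ne.symm h2t)]
                    have hB := altGo_none ('g' :: d2 :: t3) hf
                    rw [altGo_other 'g' (d2 :: t3) (by decide)] at hB
                    have hih := ih (d2 :: t3) (i + 1 + 1) (by simp at hlen ⊢; omega) (hbad_mono ⟨['&', 'g'], rfl⟩ hbad)
                    rw [hA, hB]
                    simp [hih]
              · -- d1 ≠ 'g'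
                by_cases h1l : d1 = 'l'
                · subst h1l
                  rcases t2 with _ | ⟨d2, t3⟩
                  · exact absurd (List.suffix_refl _) (hbad ['&', 'l'] (by decide))
                  · -- next char cases at &l
                    by_cases h2t : d2 = 't'
                    · subst h2t
                      rcases t3 with _ | ⟨d3, t4⟩
                      · exact absurd (List.suffix_refl _) (hbad ['&', 'l', 't'] (by decide))
                      · -- next char cases at &lt
                        by_cases h3x : d3 = ';'
                        · subst h3x
                          have hck : checkT trieA ('&' :: 'l' :: 't' :: ';' :: t4) i = (some "<", i + 1 + 1 + 1 + 1) := by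
                            rw [trieA_eq]; simp [checkT, childOf, kidsFind]
                          have hA := parseT_sym trieA '&' ('l' :: 't' :: ';' :: t4) i (i + 1 + 1 + 1 + 1) "<" hch hck
                          rw [show i + 1 + 1 + 1 + 1 - i = 4 from by omega] at hA
                          rw [show List.drop 4 ('&' :: 'l' :: 't' :: ';' :: t4) = t4 from rfl] at hA
                          have hf : findEnt entTable ('&' :: 'l' :: 't' :: ';' :: t4) = some ('<', 4) := by
                            simp [findEnt, entTable, List.isPrefixOf]
                          have hB := altGo_some ('l' :: 't' :: ';' :: t4) '<' 4 hf
                          rw [show List.drop 4 ('&' :: 'l' :: 't' :: ';' :: t4) = t4 from rfl] at hB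
                          have hih := ih t4 (i + 1 + 1 + 1 + 1) (by simp at hlen ⊢; omega) (hbad_mono ⟨['&', 'l', 't', ';'], rfl⟩ hbad)
                          rw [hA, hB]
                          simp [hih]
                        · -- d3 ≠ ';'
                          have hck : checkT trieA ('&' :: 'l' :: 't' :: d3 :: t4) i = (none, i + 1 + 1 + 1) := by
                            rw [trieA_eq]; simp [checkT, childOf, kidsFind, h3x]
                          have hA := parseT_chunk trieA '&' ('l' :: 't' :: d3 :: t4) i (i + 1 + 1 + 1) hch hck
                          rw [show i + 1 + 1 + 1 - i = 3 from by omega] at hA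
                          rw [show List.take 3 ('&' :: 'l' :: 't' :: d3 :: t4) = ['&', 'l', 't'] from rfl] at hA
                          rw [show List.drop 3 ('&' :: 'l' :: 't' :: d3 :: t4) = d3 :: t4 from rfl] at hA
                          have hf : findEnt entTable ('&' :: 'l' :: 't' :: d3 :: t4) = none := by
                            simp [findEnt, entTable, List.isPrefixOf, h3x, (Ne.symm h3x)]
                          have hB := altGo_none ('l' :: 't' :: d3 :: t4) hf
                          rw [altGo_other 'l' ('t' :: d3 :: t4) (by decide)] at hB
                          rw [altGo_other 't' (d3 :: t4) (by decide)] at hB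
                          have hih := ih (d3 :: t4) (i + 1 + 1 + 1) (by simp at hlen ⊢; omega) (hbad_mono ⟨['&', 'l', 't'], rfl⟩ hbad)
                          rw [hA, hB]
                          simp [hih]
                    · -- d2 ≠ 't'
                      have hck : checkT trieA ('&' :: 'l' :: d2 :: t3) i = (none, i + 1 + 1) := by
                        rw [trieA_eq]; simp [checkT, childOf, kidsFind, h2t]
                      have hA := parseT_chunk trieA '&' ('l' :: d2 :: t3) i (i + 1 + 1) hch hck
                      rw [show i + 1 + 1 - i = 2 from by omega] at hA
                      rw [show List.take 2 ('&' :: 'l' :: d2 :: t3) = ['&', 'l'] from rfl] at hA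
                      rw [show List.drop 2 ('&' :: 'l' :: d2 :: t3) = d2 :: t3 from rfl] at hA
                      have hf : findEnt entTable ('&' :: 'l' :: d2 :: t3) = none := by
                        simp [findEnt, entTable, List.isPrefixOf, h2t, (Ne.symm h2t)]
                      have hB := altGo_none ('l' :: d2 :: t3) hf
                      rw [altGo_other 'l' (d2 :: t3) (by decide)] at hB
                      have hih := ih (d2 :: t3) (i + 1 + 1) (by simp at hlen ⊢; omega) (hbad_mono ⟨['&', 'l'], rfl⟩ hbad)
                      rw [hA, hB]
                      simp [hih]
                · -- d1 ≠ 'l'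
                  by_cases h1f : d1 = 'f'
                  · subst h1f
                    rcases t2 with _ | ⟨d2, t3⟩
                    · exact absurd (List.suffix_refl _) (hbad ['&', 'f'] (by decide))
                    · -- next char cases at &f
                      by_cases h2r : d2 = 'r'
                      · subst h2r
                        rcases t3 with _ | ⟨d3, t4⟩
                        · exact absurd (List.suffix_refl _) (hbad ['&', 'f', 'r'] (by decide))
                        · -- next char cases at &fr
                          by_cases h3a : d3 = 'a'
                          · subst h3a
                            rcases t4 with _ | ⟨d4, t5⟩
                            · exact absurd (List.suffix_refl _) (hbad ['&', 'f', 'r', 'a'] (by decide))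
                            · -- next char cases at &fra
                              by_cases h4s : d4 = 's'
                              · subst h4s
                                rcases t5 with _ | ⟨d5, t6⟩
                                · exact absurd (List.suffix_refl _) (hbad ['&', 'f', 'r', 'a', 's'] (by decide))
                                · -- next char cases at &fras
                                  by_cases h5l : d5 = 'l'
                                  · subst h5l
                                    rcases t6 with _ | ⟨d6, t7⟩
                                    · exact absurd (List.suffix_refl _) (hbad ['&', 'f', 'r', 'a', 's', 'l'] (by decide))
                                    · -- next char cases at &frasl
                                      by_cases h6x : d6 = ';'
                                      · subst h6x
                                        have hck : checkT trieA ('&' :: 'f' :: 'r' :: 'a' :: 's' :: 'l' :: ';' :: t7) i = (some "/", i + 1 + 1 + 1 + 1 + 1 + 1 + 1) := by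
                                          rw [trieA_eq]; simp [checkT, childOf, kidsFind]
                                        have hA := parseT_sym trieA '&' ('f' :: 'r' :: 'a' :: 's' :: 'l' :: ';' :: t7) i (i + 1 + 1 + 1 + 1 + 1 + 1 + 1) "/" hch hck
                                        rw [show i + 1 + 1 + 1 + 1 + 1 + 1 + 1 - i = 7 from by omega] at hA
                                        rw [show List.drop 7 ('&' :: 'f' :: 'r' :: 'a' :: 's' :: 'l' :: ';' :: t7) = t7 from rfl] at hA
                                        have hf : findEnt entTable ('&' :: 'f' :: 'r' :: 'a' :: 's' :: 'l' :: ';' :: t7) = some ('/', 7) := by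
                                          simp [findEnt, entTable, List.isPrefixOf]
                                        have hB := altGo_some ('f' :: 'r' :: 'a' :: 's' :: 'l' :: ';' :: t7) '/' 7 hf
                                        rw [show List.drop 7 ('&' :: 'f' :: 'r' :: 'a' :: 's' :: 'l' :: ';' :: t7) = t7 from rfl] at hB
                                        have hih := ih t7 (i + 1 + 1 + 1 + 1 + 1 + 1 + 1) (by simp at hlen ⊢; omega) (hbad_mono ⟨['&', 'f', 'r', 'a', 's', 'l', ';'], rfl⟩ hbad)
                                        rw [hA, hB]
                                        simp [hih]
                                      · -- d6 ≠ ';'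
                                        have hck : checkT trieA ('&' :: 'f' :: 'r' :: 'a' :: 's' :: 'l' :: d6 :: t7) i = (none, i + 1 + 1 + 1 + 1 + 1 + 1) := by
                                          rw [trieA_eq]; simp [checkT, childOf, kidsFind, h6x]
                                        have hA := parseT_chunk trieA '&' ('f' :: 'r' :: 'a' :: 's' :: 'l' :: d6 :: t7) i (i + 1 + 1 + 1 + 1 + 1 + 1) hch hck
                                        rw [show i + 1 + 1 + 1 + 1 + 1 + 1 - i = 6 from by omega] at hA
                                        rw [show List.take 6 ('&' :: 'f' :: 'r' :: 'a' :: 's' :: 'l' :: d6 :: t7) = ['&', 'f', 'r', 'a', 's', 'l'] from rfl] at hA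
                                        rw [show List.drop 6 ('&' :: 'f' :: 'r' :: 'a' :: 's' :: 'l' :: d6 :: t7) = d6 :: t7 from rfl] at hA
                                        have hf : findEnt entTable ('&' :: 'f' :: 'r' :: 'a' :: 's' :: 'l' :: d6 :: t7) = none := by
                                          simp [findEnt, entTable, List.isPrefixOf, h6x, (Ne.symm h6x)]
                                        have hB := altGo_none ('f' :: 'r' :: 'a' :: 's' :: 'l' :: d6 :: t7) hf
                                        rw [altGo_other 'f' ('r' :: 'a' :: 's' :: 'l' :: d6 :: t7) (by decide)] at hB
                                        rw [altGo_other 'r' ('a' :: 's' :: 'l' :: d6 :: t7) (by decide)] at hB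
                                        rw [altGo_other 'a' ('s' :: 'l' :: d6 :: t7) (by decide)] at hB
                                        rw [altGo_other 's' ('l' :: d6 :: t7) (by decide)] at hB
                                        rw [altGo_other 'l' (d6 :: t7) (by decide)] at hB
                                        have hih := ih (d6 :: t7) (i + 1 + 1 + 1 + 1 + 1 + 1) (by simp at hlen ⊢; omega) (hbad_mono ⟨['&', 'f', 'r', 'a', 's', 'l'], rfl⟩ hbad)
                                        rw [hA, hB]
                                        simp [hih]
                                  · -- d5 ≠ 'l'
                                    have hck : checkT trieA ('&' :: 'f' :: 'r' :: 'a' :: 's' :: d5 :: t6) i = (none, i + 1 + 1 + 1 + 1 + 1) := by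
                                      rw [trieA_eq]; simp [checkT, childOf, kidsFind, h5l]
                                    have hA := parseT_chunk trieA '&' ('f' :: 'r' :: 'a' :: 's' :: d5 :: t6) i (i + 1 + 1 + 1 + 1 + 1) hch hck
                                    rw [show i + 1 + 1 + 1 + 1 + 1 - i = 5 from by omega] at hA
                                    rw [show List.take 5 ('&' :: 'f' :: 'r' :: 'a' :: 's' :: d5 :: t6) = ['&', 'f', 'r', 'a', 's'] from rfl] at hA
                                    rw [show List.drop 5 ('&' :: 'f' :: 'r' :: 'a' :: 's' :: d5 :: t6) = d5 :: t6 from rfl] at hA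
                                    have hf : findEnt entTable ('&' :: 'f' :: 'r' :: 'a' :: 's' :: d5 :: t6) = none := by
                                      simp [findEnt, entTable, List.isPrefixOf, h5l, (Ne.symm h5l)]
                                    have hB := altGo_none ('f' :: 'r' :: 'a' :: 's' :: d5 :: t6) hf
                                    rw [altGo_other 'f' ('r' :: 'a' :: 's' :: d5 :: t6) (by decide)] at hB
                                    rw [altGo_other 'r' ('a' :: 's' :: d5 :: t6) (by decide)] at hB
                                    rw [altGo_other 'a' ('s' :: d5 :: t6) (by decide)] at hB
                                    rw [altGo_other 's' (d5 :: t6) (by decide)] at hB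
                                    have hih := ih (d5 :: t6) (i + 1 + 1 + 1 + 1 + 1) (by simp at hlen ⊢; omega) (hbad_mono ⟨['&', 'f', 'r', 'a', 's'], rfl⟩ hbad)
                                    rw [hA, hB]
                                    simp [hih]
                              · -- d4 ≠ 's'
                                have hck : checkT trieA ('&' :: 'f' :: 'r' :: 'a' :: d4 :: t5) i = (none, i + 1 + 1 + 1 + 1) := by
                                  rw [trieA_eq]; simp [checkT, childOf, kidsFind, h4s]
                                have hA := parseT_chunk trieA '&' ('f' :: 'r' :: 'a' :: d4 :: t5) i (i + 1 + 1 + 1 + 1) hch hck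
                                rw [show i + 1 + 1 + 1 + 1 - i = 4 from by omega] at hA
                                rw [show List.take 4 ('&' :: 'f' :: 'r' :: 'a' :: d4 :: t5) = ['&', 'f', 'r', 'a'] from rfl] at hA
                                rw [show List.drop 4 ('&' :: 'f' :: 'r' :: 'a' :: d4 :: t5) = d4 :: t5 from rfl] at hA
                                have hf : findEnt entTable ('&' :: 'f' :: 'r' :: 'a' :: d4 :: t5) = none := by
                                  simp [findEnt, entTable, List.isPrefixOf, h4s, (Ne.symm h4s)]
                                have hB := altGo_none ('f' :: 'r' :: 'a' :: d4 :: t5) hf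
                                rw [altGo_other 'f' ('r' :: 'a' :: d4 :: t5) (by decide)] at hB
                                rw [altGo_other 'r' ('a' :: d4 :: t5) (by decide)] at hB
                                rw [altGo_other 'a' (d4 :: t5) (by decide)] at hB
                                have hih := ih (d4 :: t5) (i + 1 + 1 + 1 + 1) (by simp at hlen ⊢; omega) (hbad_mono ⟨['&', 'f', 'r', 'a'], rfl⟩ hbad)
                                rw [hA, hB]
                                simp [hih]
                          · -- d3 ≠ 'a'
                            have hck : checkT trieA ('&' :: 'f' :: 'r' :: d3 :: t4) i = (none, i + 1 + 1 + 1) := by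
                              rw [trieA_eq]; simp [checkT, childOf, kidsFind, h3a]
                            have hA := parseT_chunk trieA '&' ('f' :: 'r' :: d3 :: t4) i (i + 1 + 1 + 1) hch hck
                            rw [show i + 1 + 1 + 1 - i = 3 from by omega] at hA
                            rw [show List.take 3 ('&' :: 'f' :: 'r' :: d3 :: t4) = ['&', 'f', 'r'] from rfl] at hA
                            rw [show List.drop 3 ('&' :: 'f' :: 'r' :: d3 :: t4) = d3 :: t4 from rfl] at hA
                            have hf : findEnt entTable ('&' :: 'f' :: 'r' :: d3 :: t4) = none := by
                              simp [findEnt, entTable, List.isPrefixOf, h3a, (Ne.symm h3a)]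
                            have hB := altGo_none ('f' :: 'r' :: d3 :: t4) hf
                            rw [altGo_other 'f' ('r' :: d3 :: t4) (by decide)] at hB
                            rw [altGo_other 'r' (d3 :: t4) (by decide)] at hB
                            have hih := ih (d3 :: t4) (i + 1 + 1 + 1) (by simp at hlen ⊢; omega) (hbad_mono ⟨['&', 'f', 'r'], rfl⟩ hbad)
                            rw [hA, hB]
                            simp [hih]
                      · -- d2 ≠ 'r'
                        have hck : checkT trieA ('&' :: 'f' :: d2 :: t3) i = (none, i + 1 + 1) := by
                          rw [trieA_eq]; simp [checkT, childOf, kidsFind, h2r]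
                        have hA := parseT_chunk trieA '&' ('f' :: d2 :: t3) i (i + 1 + 1) hch hck
                        rw [show i + 1 + 1 - i = 2 from by omega] at hA
                        rw [show List.take 2 ('&' :: 'f' :: d2 :: t3) = ['&', 'f'] from rfl] at hA
                        rw [show List.drop 2 ('&' :: 'f' :: d2 :: t3) = d2 :: t3 from rfl] at hA
                        have hf : findEnt entTable ('&' :: 'f' :: d2 :: t3) = none := by
                          simp [findEnt, entTable, List.isPrefixOf, h2r, (Ne.symm h2r)]
                        have hB := altGo_none ('f' :: d2 :: t3) hf
                        rw [altGo_other 'f' (d2 :: t3) (by decide)] at hB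
                        have hih := ih (d2 :: t3) (i + 1 + 1) (by simp at hlen ⊢; omega) (hbad_mono ⟨['&', 'f'], rfl⟩ hbad)
                        rw [hA, hB]
                        simp [hih]
                  · -- d1 ≠ 'f'
                    have hck : checkT trieA ('&' :: d1 :: t2) i = (none, i + 1) := by
                      rw [trieA_eq]; simp [checkT, childOf, kidsFind, h1q, h1a, h1g, h1l, h1f]
                    have hA := parseT_chunk trieA '&' (d1 :: t2) i (i + 1) hch hck
                    rw [show i + 1 - i = 1 from by omega] at hA
                    rw [show List.take 1 ('&' :: d1 :: t2) = ['&'] from rfl] at hA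
                    rw [show List.drop 1 ('&' :: d1 :: t2) = d1 :: t2 from rfl] at hA
                    have hf : findEnt entTable ('&' :: d1 :: t2) = none := by
                      simp [findEnt, entTable, List.isPrefixOf, h1q, h1a, h1g, h1l, h1f, (Ne.symm h1q), (Ne.symm h1a), (Ne.symm h1g), (Ne.symm h1l), (Ne.symm h1f)]
                    have hB := altGo_none (d1 :: t2) hf
                    have hih := ih (d1 :: t2) (i + 1) (by simp at hlen ⊢; omega) (hbad_mono ⟨['&'], rfl⟩ hbad)
                    rw [hA, hB]
                    simp [hih]
      · have hcn : childOf trieA c = none := by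
          rw [trieA_eq]; simp [childOf, kidsFind, hc0]
        rw [parseT_skip _ _ _ _ hcn, altGo_other _ _ hc0]
        have hih := ih t1 (i + 1) (by simp at hlen ⊢; omega) (hbad_mono ⟨[c], rfl⟩ hbad)
        simp [hih]

-- ===== VERDICT (by name: the statement is the Claim_ definition above) =====
theorem entityParser_spec : Claim_equal_entityParser := by
  intro text _ hpre
  unfold Spec_entityParser entityParser entityParser_alt
  exact congrArg String.ofList (main_go text.toList.length text.toList 0 le_rfl hpre)

@[simp] theorem entityParser_raises : Claim_raises_entityParser := by
  unfold Claim_raises_entityParser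
  constructor
  · intro t _ hr hpre
    obtain ⟨p, hp, hs⟩ := hr
    exact hpre p hp hs
  · refine ⟨by decide, by decide, ?_⟩
    show String.ofList (altGo "&amp".toList).flatten = "&amp"
    rw [show ("&amp".toList) = ['&', 'a', 'm', 'p'] from rfl]
    rw [altGo_none (['a', 'm', 'p']) (by decide),
        altGo_other 'a' (['m', 'p']) (by decide),
        altGo_other 'm' (['p']) (by decide),
        altGo_other 'p' ([]) (by decide), altGo_nil]
    rfl
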